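-- pv_equiv track=rewrite | github.com/camhwilson/HealthyRide | neighborhood_analytics/plotting_funcs.py | return_arrival_daily_dict
-- ===== SOURCE A (Python) =====
-- def return_arrival_daily_dict(ordered_arrivals, neighborhoods):
--     arrival_daily_dict = {}
--     for day, val in ordered_arrivals.items():
--         neighborhood_dict = {}
--         for key, val in val.items():
--             for i in neighborhoods:
--                 if i not in neighborhood_dict.keys():
--                     neighborhood_dict[i] = [val[i]]
--                 else:
--                     neighborhood_dict[i] += [val[i]]
--         arrival_daily_dict[day] = neighborhood_dict
--     return arrival_daily_dict
-- ===== SOURCE B (Python) =====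
-- def return_arrival_daily_dict(ordered_arrivals, neighborhoods):
--     result = {}
--     for day, val in ordered_arrivals.items():
--         rows = [[row[i] for i in neighborhoods] for row in val.values()]
--         result[day] = {i: list(col) for i, col in zip(neighborhoods, zip(*rows))}
--     return result
-- ===== Notes on version B (the rewrite author's own statement) =====
-- stated objective: idiomatic
-- what changed: A builds each day's dict row-major (for each inner row, for each neighborhood, membership-check then append to an accumulator list); B transposes each day's rows with the zip(*rows) idiom and zips the columns with the neighborhood names, with no accumulator or membership state. Pre_ excludes inputs where a listed neighborhood is missing from some row (A raises KeyError) and duplicate neighborhood names with nonempty rows (A's repeated appends vs B's key-overwrite are equally accidental under duplicate keys).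
-- outside the precondition, e.g. on return_arrival_daily_dict({'d': {'r': {'x': 1}}}, ['x', 'x']): A returns {'d': {'x': [1, 1]}}, B returns {'d': {'x': [1]}}
import Mathlib
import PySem

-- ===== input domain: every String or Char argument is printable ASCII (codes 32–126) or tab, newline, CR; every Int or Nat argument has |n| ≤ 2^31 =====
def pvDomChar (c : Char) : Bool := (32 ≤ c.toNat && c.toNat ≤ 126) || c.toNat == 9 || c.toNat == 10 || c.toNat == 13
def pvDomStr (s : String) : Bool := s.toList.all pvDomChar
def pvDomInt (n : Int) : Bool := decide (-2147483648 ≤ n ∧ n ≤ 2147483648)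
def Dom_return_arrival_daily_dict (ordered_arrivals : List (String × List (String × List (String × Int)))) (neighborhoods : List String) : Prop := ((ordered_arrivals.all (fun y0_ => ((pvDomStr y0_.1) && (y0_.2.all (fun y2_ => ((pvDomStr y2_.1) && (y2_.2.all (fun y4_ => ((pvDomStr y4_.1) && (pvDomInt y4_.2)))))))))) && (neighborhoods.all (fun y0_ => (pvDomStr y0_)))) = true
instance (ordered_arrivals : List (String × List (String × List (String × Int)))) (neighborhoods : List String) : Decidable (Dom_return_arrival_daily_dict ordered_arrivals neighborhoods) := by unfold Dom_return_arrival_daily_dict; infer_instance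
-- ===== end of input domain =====

-- B replaces A's row-major membership-check/append accumulator loop by the zip-transpose
-- idiom: transpose each day's rows with zip(*rows) and zip the columns with the
-- neighborhood names (objective: idiomatic; same cost).

-- ===== PORT A =====
-- Literal port of A. `val[i]` (Python: raises KeyError when i is missing, excluded by
-- Pre_) is `PySem.Dict.getD … 0`: the default 0 is only reached outside Pre_.
def return_arrival_daily_dict (ordered_arrivals : List (String × List (String × List (String × Int)))) (neighborhoods : List String) : List (String × List (String × List Int)) :=
  (ordered_arrivals.foldl
    (fun (add : PySem.Dict String (List (String × List Int))) dv =>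
      let nd : PySem.Dict String (List Int) :=
        dv.2.foldl
          (fun nd row =>
            neighborhoods.foldl
              (fun nd i =>
                if nd.contains i = false then
                  nd.insert i [PySem.Dict.getD (PySem.Dict.mk row.2) i 0]
                else
                  nd.modify i [] (fun l => l ++ [PySem.Dict.getD (PySem.Dict.mk row.2) i 0]))
              nd)
          PySem.Dict.empty
      add.insert dv.1 nd.items)
    PySem.Dict.empty).items

-- ===== PORT B =====
-- zip(*rows): repeatedly take the head of every row until the row list or some row is
-- exhausted — exact for Python's zip truncation rule (columns as lists: `list(col)`).
def pyZipStar (rows : List (List Int)) : List (List Int) :=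
  if h : rows.isEmpty ∨ rows.any (·.isEmpty) then []
  else (rows.map (·.headD 0)) :: pyZipStar (rows.map (·.tail))
termination_by (rows.headD []).length
decreasing_by
  push_neg at h
  obtain ⟨h1, h2⟩ := h
  cases rows with
  | nil => simp at h1
  | cons r rs =>
    cases r with
    | nil => exact absurd (by simp : (([] : List Int) :: rs).any (·.isEmpty) = true) (by simp [h2])
    | cons a t => simp

def return_arrival_daily_dict_alt (ordered_arrivals : List (String × List (String × List (String × Int)))) (neighborhoods : List String) : List (String × List (String × List Int)) :=
  (ordered_arrivals.foldl
    (fun (res : PySem.Dict String (List (String × List Int))) dv =>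
      let rows : List (List Int) :=
        dv.2.map (fun row => neighborhoods.map (fun i => PySem.Dict.getD (PySem.Dict.mk row.2) i 0))
      res.insert dv.1
        (((neighborhoods.zip (pyZipStar rows)).foldl
            (fun (d : PySem.Dict String (List Int)) p => d.insert p.1 p.2)
            PySem.Dict.empty).items))
    PySem.Dict.empty).items

-- ===== PRECONDITION & SPEC =====
-- Pre_ excludes (a) inputs where a listed neighborhood is missing from some inner dict's
-- row, on which A raises KeyError, and (b) duplicate entries in `neighborhoods` combined
-- with a nonempty inner dict, on which A's repeated appends and B's key-overwrite under
-- duplicate dict keys are equally accidental (A returns each value doubled, B once — see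
-- the cited example); duplicates whose inner dicts are all empty are harmless and stay inside.
def Pre_return_arrival_daily_dict (ordered_arrivals : List (String × List (String × List (String × Int)))) (neighborhoods : List String) : Prop :=
  (neighborhoods.Nodup ∨ ∀ dv ∈ ordered_arrivals, dv.2 = []) ∧
  ∀ dv ∈ ordered_arrivals, ∀ row ∈ dv.2, ∀ i ∈ neighborhoods,
    (PySem.Dict.mk row.2).contains i = true
instance (ordered_arrivals : List (String × List (String × List (String × Int)))) (neighborhoods : List String) : Decidable (Pre_return_arrival_daily_dict ordered_arrivals neighborhoods) := by unfold Pre_return_arrival_daily_dict; infer_instance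

def pvWitness_return_arrival_daily_dict : (List (String × List (String × List (String × Int)))) × List String :=
  ([("d1", [("r1", [("x", 1), ("y", 2)]), ("r2", [("x", 3), ("y", 4)])]), ("d2", [])], ["x", "y"])

def Spec_return_arrival_daily_dict (ordered_arrivals : List (String × List (String × List (String × Int)))) (neighborhoods : List String) (out : List (String × List (String × List Int))) : Prop := out = return_arrival_daily_dict_alt ordered_arrivals neighborhoods
instance (ordered_arrivals : List (String × List (String × List (String × Int)))) (neighborhoods : List String) (out : List (String × List (String × List Int))) : Decidable (Spec_return_arrival_daily_dict ordered_arrivals neighborhoods out) := by unfold Spec_return_arrival_daily_dict; infer_instance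

-- ===== CLAIM (what is proved, stated in full; the proofs are below) =====
def Claim_equal_return_arrival_daily_dict : Prop := ∀ (ordered_arrivals : List (String × List (String × List (String × Int)))) (neighborhoods : List String), Dom_return_arrival_daily_dict ordered_arrivals neighborhoods → Pre_return_arrival_daily_dict ordered_arrivals neighborhoods → Spec_return_arrival_daily_dict ordered_arrivals neighborhoods (return_arrival_daily_dict ordered_arrivals neighborhoods)

-- ===== LEMMAS AND PROOFS =====

-- value A/B read for neighborhood i in inner-dict row `row`
def pvCol (row : String × List (String × Int)) (i : String) : Int :=
  PySem.Dict.getD (PySem.Dict.mk row.2) i 0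

-- A's one-row step on the neighborhood accumulator
def pvStep (v : String → Int) (nd : PySem.Dict String (List Int)) (i : String) : PySem.Dict String (List Int) :=
  if nd.contains i = false then nd.insert i [v i]
  else nd.modify i [] (fun l => l ++ [v i])

-- first-row pass: all keys fresh, the step inserts
theorem pvStep_fresh (v : String → Int) (l : List String) (nd : PySem.Dict String (List Int))
    (hnd : l.Nodup) (hfree : ∀ i ∈ l, nd.contains i = false) :
    l.foldl (pvStep v) nd = PySem.Dict.mk (nd.items ++ l.map (fun i => (i, [v i]))) := by
  induction l generalizing nd with
  | nil => simp
  | cons i t ih =>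
    have hi : nd.contains i = false := hfree i (by simp)
    simp only [List.foldl_cons, List.map_cons]
    rw [show pvStep v nd i = PySem.Dict.mk (nd.items ++ [(i, [v i])]) by
      simp [pvStep, hi, PySem.Dict.insert]]
    rw [ih _ (List.Nodup.of_cons hnd) ?_]
    · simp
    · intro j hj
      have hji : j ≠ i := by
        rintro rfl; exact (List.nodup_cons.mp hnd).1 hj
      have h0 := hfree j (by simp [hj])
      simp [PySem.Dict.contains] at h0 ⊢
      exact ⟨h0, fun h => hji h.symm⟩

-- later-row pass: keys present, the step appends to each entry
theorem pvStep_present (v : String → Int) (l : List String) (pre : List (String × List Int)) (g : String → List Int)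
    (hnd : l.Nodup) (hpre : ∀ i ∈ l, ∀ p ∈ pre, p.1 ≠ i) :
    l.foldl (pvStep v) (PySem.Dict.mk (pre ++ l.map (fun i => (i, g i))))
      = PySem.Dict.mk (pre ++ l.map (fun i => (i, g i ++ [v i]))) := by
  induction l generalizing pre with
  | nil => simp
  | cons i t ih =>
    obtain ⟨hit, hndt⟩ := List.nodup_cons.mp hnd
    simp only [List.foldl_cons, List.map_cons]
    have hcon : (PySem.Dict.mk (pre ++ (i, g i) :: t.map (fun j => (j, g j)))).contains i = true := by
      simp [PySem.Dict.contains]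
    have hget : (PySem.Dict.mk (pre ++ (i, g i) :: t.map (fun j => (j, g j)))).getD i [] = g i := by
      simp only [PySem.Dict.getD, PySem.Dict.get?, List.find?_append]
      rw [List.find?_eq_none.mpr (fun p hp => by simpa using (hpre i (by simp) p hp))]
      simp
    have hf1 : List.map (fun p => if (p.1 == i) = true then (i, g i ++ [v i]) else p) pre = pre := by
      calc List.map (fun p => if (p.1 == i) = true then (i, g i ++ [v i]) else p) pre
          = List.map id pre := List.map_congr_left (fun p hp => by
              simp [show ¬(p.1 = i) from hpre i (by simp) p hp])
        _ = pre := List.map_id _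
    have hf2 : List.map (fun p => if (p.1 == i) = true then (i, g i ++ [v i]) else p)
        (t.map (fun j => (j, g j))) = t.map (fun j => (j, g j)) := by
      rw [List.map_map]
      exact List.map_congr_left (fun j hj => by
        simp [show ¬(j = i) from fun h => hit (h ▸ hj)])
    have hstep : pvStep v (PySem.Dict.mk (pre ++ (i, g i) :: t.map (fun j => (j, g j)))) i
        = PySem.Dict.mk ((pre ++ [(i, g i ++ [v i])]) ++ t.map (fun j => (j, g j))) := by
      simp only [pvStep, hcon, Bool.true_eq_false, if_false]
      simp only [PySem.Dict.modify, hget, PySem.Dict.insert, hcon, if_true]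
      congr 1
      simp only [List.map_append, List.map_cons, hf1, hf2]
      simp
    rw [hstep, ih (pre ++ [(i, g i ++ [v i])]) hndt ?_]
    · simp
    · intro j hj p hp
      rcases List.mem_append.mp hp with hp | hp
      · exact hpre j (by simp [hj]) p hp
      · simp only [List.mem_singleton] at hp
        subst hp
        intro h
        exact hit ((show i = j from h) ▸ hj)

theorem pvRows_aux (nbhds : List String) (hnd : nbhds.Nodup)
    (rows : List (String × List (String × Int))) (g : String → List Int) :
    rows.foldl (fun nd row => nbhds.foldl (pvStep (pvCol row)) nd)
        (PySem.Dict.mk (nbhds.map (fun i => (i, g i))))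
      = PySem.Dict.mk (nbhds.map (fun i => (i, g i ++ rows.map (fun r => pvCol r i)))) := by
  induction rows generalizing g with
  | nil => simp
  | cons r rs ih =>
    simp only [List.foldl_cons]
    have h1 := pvStep_present (pvCol r) nbhds [] g hnd (by simp)
    simp only [List.nil_append] at h1
    rw [h1, ih (fun i => g i ++ [pvCol r i])]
    congr 1
    refine List.map_congr_left (fun i _ => ?_)
    simp

theorem pvRows (nbhds : List String) (hnd : nbhds.Nodup)
    (rows : List (String × List (String × Int))) :
    rows.foldl (fun nd row => nbhds.foldl (pvStep (pvCol row)) nd) PySem.Dict.empty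
      = PySem.Dict.mk (if rows = [] then [] else nbhds.map (fun i => (i, rows.map (fun r => pvCol r i)))) := by
  cases rows with
  | nil => simp [PySem.Dict.empty]
  | cons r rs =>
    simp only [List.foldl_cons]
    rw [pvStep_fresh (pvCol r) nbhds PySem.Dict.empty hnd (by simp [PySem.Dict.empty, PySem.Dict.contains])]
    rw [show (PySem.Dict.mk ((PySem.Dict.empty : PySem.Dict String (List Int)).items ++ nbhds.map (fun i => (i, [pvCol r i]))))
        = PySem.Dict.mk (nbhds.map (fun i => (i, [pvCol r i]))) from by simp [PySem.Dict.empty]]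
    rw [pvRows_aux nbhds hnd rs (fun i => [pvCol r i])]
    simp

-- zip(*rows) of a uniform row matrix indexed by nbhds is the list of nbhds-columns
theorem pvZipStar_uniform {R : Type} (nbhds : List String) (rs : List R) (v : R → String → Int)
    (hrs : rs ≠ []) :
    pyZipStar (rs.map (fun r => nbhds.map (v r))) = nbhds.map (fun i => rs.map (fun r => v r i)) := by
  induction nbhds generalizing v with
  | nil =>
    rw [pyZipStar]
    rw [dif_pos ?_]
    · simp
    · right
      cases rs with
      | nil => exact absurd rfl hrs
      | cons a t => simp
  | cons i t ih =>
    rw [pyZipStar]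
    rw [dif_neg ?_]
    · simp only [List.map_map, List.map_cons]
      congr 1
      exact ih v
    · push_neg
      refine ⟨by simp [hrs], by simp⟩

-- the dict built from nodup (key, value) pairs by repeated insert is the literal dict
theorem pvB_pairs (l : List (String × List Int)) (d : PySem.Dict String (List Int))
    (hnd : (l.map Prod.fst).Nodup) (hfree : ∀ p ∈ l, d.contains p.1 = false) :
    l.foldl (fun (d : PySem.Dict String (List Int)) p => d.insert p.1 p.2) d
      = PySem.Dict.mk (d.items ++ l) := by
  induction l generalizing d with
  | nil => simp
  | cons p t ih =>
    have hp : d.contains p.1 = false := hfree p (by simp)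
    simp only [List.foldl_cons]
    rw [show d.insert p.1 p.2 = PySem.Dict.mk (d.items ++ [p]) by
      simp [PySem.Dict.insert, hp]]
    have hnd' : (p.1 :: t.map Prod.fst).Nodup := by simpa using hnd
    obtain ⟨hp1, hndt⟩ := List.nodup_cons.mp hnd'
    rw [ih _ hndt ?_]
    · simp
    · intro q hq
      have hqp : q.1 ≠ p.1 := by
        intro h
        have hq1 : q.1 ∈ t.map Prod.fst := List.mem_map_of_mem hq
        exact hp1 (h ▸ hq1)
      have h0 := hfree q (by simp [hq])
      simp [PySem.Dict.contains] at h0 ⊢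
      exact ⟨h0, fun h => hqp h.symm⟩

-- zipping a list with its own image is mapping the pairing
theorem pvZip_self_map {α β : Type} (l : List α) (f : α → β) :
    l.zip (l.map f) = l.map (fun x => (x, f x)) := by
  induction l with
  | nil => simp
  | cons a t ih => simp [ih]

-- ===== VERDICT (by name: the statement is the Claim_ definition above) =====
theorem return_arrival_daily_dict_spec : Claim_equal_return_arrival_daily_dict := by
  intro oa nbhds _ hPre
  obtain ⟨hdup, -⟩ := hPre
  unfold Spec_return_arrival_daily_dict return_arrival_daily_dict return_arrival_daily_dict_alt
  congr 1
  refine List.foldl_ext _ _ _ (fun acc dv hdv => ?_)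
  by_cases h2 : dv.2 = []
  · -- empty inner dict: both sides attach the empty dict
    have hA : dv.2.foldl
        (fun nd row => nbhds.foldl (pvStep (pvCol row)) nd) PySem.Dict.empty
        = PySem.Dict.empty := by simp [h2]
    simp only [h2]
    rw [show pyZipStar (([] : List (String × List (String × Int))).map
          (fun row => nbhds.map (fun i => PySem.Dict.getD (PySem.Dict.mk row.2) i 0))) = [] from by
      rw [pyZipStar]; simp]
    simp [PySem.Dict.empty]
  · -- nonempty inner dict: Pre_'s disjunction forces nodup neighborhood names
    have hnd : nbhds.Nodup := by
      rcases hdup with hnd | hemp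
      · exact hnd
      · exact absurd (hemp dv hdv) h2
    have hA := pvRows nbhds hnd dv.2
    have hA' : dv.2.foldl
        (fun nd row => nbhds.foldl
          (fun nd i =>
            if nd.contains i = false then nd.insert i [PySem.Dict.getD (PySem.Dict.mk row.2) i 0]
            else nd.modify i [] (fun l => l ++ [PySem.Dict.getD (PySem.Dict.mk row.2) i 0])) nd)
        PySem.Dict.empty
        = PySem.Dict.mk (if dv.2 = [] then [] else nbhds.map (fun i => (i, dv.2.map (fun r => pvCol r i)))) := hA
    rw [hA']
    simp only [h2, if_false]
    rw [pvZipStar_uniform nbhds dv.2 (fun r i => PySem.Dict.getD (PySem.Dict.mk r.2) i 0) h2]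
    rw [pvZip_self_map nbhds (fun i => dv.2.map (fun r => PySem.Dict.getD (PySem.Dict.mk r.2) i 0))]
    rw [pvB_pairs _ PySem.Dict.empty (by simpa [List.map_map, Function.comp_def] using hnd)
        (by simp [PySem.Dict.empty, PySem.Dict.contains])]
    simp [PySem.Dict.empty]
    rfl
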